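-- pv_equiv track=rewrite | github.com/cocotb/cocotb | src/cocotb_tools/runner.py | _as_define_value
-- ===== SOURCE A (Python) =====
-- def _as_define_value(value: object) -> str:
--     if isinstance(value, int):
--         return str(value)
--     elif isinstance(value, str):
--         for char in value:
--             if ord(char) < 32 or ord(char) >= 255 or char == '"':
--                 # Control characters are generally not supported.
--                 # Not sure if there's any way to escape quotes.
--                 raise ValueError(
--                     f"Character {char!r} not supported in define value"
--                 )
--         return '"\\"' + value.replace("\\", "\\\\") + '\\""'
--     else:
--         raise TypeError("Can't serialize this type as an SV literal")
-- ===== SOURCE B (Python) =====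
-- def _as_define_value(value: object) -> str:
--     if isinstance(value, int):
--         return str(value)
--     if isinstance(value, str):
--         # single fused pass: validate and escape each character while building the
--         # output pieces, instead of a validation loop followed by str.replace
--         parts = ['"\\"']
--         for char in value:
--             if not ("\x20" <= char <= "\xfe") or char == '"':
--                 raise ValueError(
--                     f"Character {char!r} not supported in define value"
--                 )
--             parts.append("\\\\" if char == "\\" else char)
--         parts.append('\\""')
--         return "".join(parts)
--     raise TypeError("Can't serialize this type as an SV literal")
-- ===== Notes on version B (the rewrite author's own statement) =====
-- stated objective: alternative
-- what changed: A validates the whole string in one loop and then rewrites backslashes with a separate str.replace pass; B fuses both into a single pass that validates each character and simultaneously appends its escaped form to a list of pieces joined at the end, so the str.replace pass disappears.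
import Mathlib
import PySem

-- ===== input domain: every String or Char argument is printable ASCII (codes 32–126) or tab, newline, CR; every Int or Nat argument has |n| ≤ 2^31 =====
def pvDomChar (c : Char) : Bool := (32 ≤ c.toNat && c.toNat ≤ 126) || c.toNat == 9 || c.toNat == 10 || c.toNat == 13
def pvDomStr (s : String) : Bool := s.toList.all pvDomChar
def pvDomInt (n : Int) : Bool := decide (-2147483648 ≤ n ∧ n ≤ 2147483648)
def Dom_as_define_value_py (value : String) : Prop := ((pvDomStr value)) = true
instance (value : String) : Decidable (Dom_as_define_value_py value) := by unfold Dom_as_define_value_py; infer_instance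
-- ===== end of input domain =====

-- B fuses A's two stages (validation loop, then a str.replace pass) into one pass that
-- validates and escapes each character while building the output pieces (objective: alternative).
-- Only the str branch of the Python is in scope (the argument type here is String).

-- ===== PORT A =====
-- the for-loop: raises (returns false) at the first char with ord<32, ord>=255 or '"'
def aScan : List Char → Bool
  | [] => true
  | c :: rest =>
    if c.toNat < 32 ∨ 255 ≤ c.toNat ∨ c = '"' then false else aScan rest

def as_define_value_py (value : String) : String :=
  if aScan value.toList then
    "\"\\\"" ++ PySem.Str.replace value "\\" "\\\\" ++ "\\\"\""
  else
    ""  -- raise ValueError: excluded by Pre_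

-- ===== PORT B =====
-- the fused loop: none = raise at a bad char; otherwise the escaped pieces, concatenated
def bEscape : List Char → Option (List Char)
  | [] => some []
  | c :: rest =>
    if ¬(0x20 ≤ c.toNat ∧ c.toNat ≤ 0xfe) ∨ c = '"' then none
    else (bEscape rest).map (fun t => (if c = '\\' then ['\\', '\\'] else [c]) ++ t)

def as_define_value_py_alt (value : String) : String :=
  match bEscape value.toList with
  | none => ""  -- raise ValueError: excluded by Pre_
  | some l => "\"\\\"" ++ String.ofList l ++ "\\\"\""

-- ===== PRECONDITION & SPEC =====
-- Pre_ excludes exactly the inputs on which A raises ValueError: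
-- a character with ord < 32 or ord ≥ 255, or a double quote.
def Pre_as_define_value_py (value : String) : Prop :=
  (value.toList.all (fun c => 32 ≤ c.toNat && c.toNat < 255 && c != '"')) = true
instance (value : String) : Decidable (Pre_as_define_value_py value) := by
  unfold Pre_as_define_value_py; infer_instance

def pvWitness_as_define_value_py : String := "a"

def Spec_as_define_value_py (value : String) (out : String) : Prop := out = as_define_value_py_alt value
instance (value : String) (out : String) : Decidable (Spec_as_define_value_py value out) := by unfold Spec_as_define_value_py; infer_instance

-- ===== CLAIM =====
def Claim_equal_as_define_value_py : Prop := ∀ (value : String), Dom_as_define_value_py value → Pre_as_define_value_py value → Spec_as_define_value_py value (as_define_value_py value)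

-- ===== LEMMAS AND PROOFS =====
def escCh (c : Char) : List Char := if c = '\\' then ['\\', '\\'] else [c]

theorem aScan_true_of_good (l : List Char)
    (h : ∀ c ∈ l, 32 ≤ c.toNat ∧ c.toNat < 255 ∧ c ≠ '"') : aScan l = true := by
  induction l with
  | nil => rfl
  | cons c rest ih =>
    have hc := h c (List.mem_cons_self ..)
    simp only [aScan]
    rw [if_neg (by push Not; exact ⟨by omega, by omega, hc.2.2⟩)]
    exact ih (fun x hx => h x (List.mem_cons_of_mem _ hx))

theorem bEscape_of_good (l : List Char)
    (h : ∀ c ∈ l, 32 ≤ c.toNat ∧ c.toNat < 255 ∧ c ≠ '"') :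
    bEscape l = some (l.flatMap escCh) := by
  induction l with
  | nil => rfl
  | cons c rest ih =>
    obtain ⟨h1, h2, h3⟩ := h c (List.mem_cons_self ..)
    simp only [bEscape]
    rw [if_neg (by push Not; exact ⟨⟨by omega, by omega⟩, h3⟩)]
    rw [ih (fun x hx => h x (List.mem_cons_of_mem _ hx))]
    simp [escCh, List.flatMap_cons]

theorem replaceGo_single (fuel : Nat) : ∀ (l acc : List Char), l.length ≤ fuel →
    PySem.Chars.replace.go ['\\'] ['\\', '\\'] fuel l acc =
      acc.reverse ++ l.flatMap escCh := by
  induction fuel with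
  | zero =>
    intro l acc hl
    have : l = [] := List.eq_nil_of_length_eq_zero (Nat.le_zero.mp hl)
    subst this; simp [PySem.Chars.replace.go]
  | succ n ih =>
    intro l acc hl
    cases l with
    | nil => simp [PySem.Chars.replace.go]
    | cons c t =>
      simp only [PySem.Chars.replace.go]
      by_cases hc : c = '\\'
      · subst hc
        rw [if_pos (by simp [List.isPrefixOf])]
        simp only [List.length_cons] at hl
        rw [ih _ _ (by simpa using Nat.lt_succ_iff.mp (Nat.lt_of_lt_of_le (Nat.lt_succ_self _) hl))]
        simp [escCh, List.flatMap_cons]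
      · rw [if_neg (by simp [List.isPrefixOf]; exact fun h => hc h.symm)]
        simp only [List.length_cons] at hl
        rw [ih _ _ (by omega)]
        simp [escCh, hc, List.flatMap_cons]

theorem replace_backslash (s : String) :
    PySem.Str.replace s "\\" "\\\\" = String.ofList (s.toList.flatMap escCh) := by
  simp only [PySem.Str.replace, PySem.Chars.replace]
  rw [if_neg (by decide)]
  rw [show ("\\" : String).toList = ['\\'] from rfl,
      show ("\\\\" : String).toList = ['\\', '\\'] from rfl]
  rw [replaceGo_single _ _ _ (le_refl _)]
  simp

-- ===== VERDICT =====
theorem as_define_value_py_spec : Claim_equal_as_define_value_py := by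
  intro value _ hpre
  unfold Pre_as_define_value_py at hpre
  rw [List.all_eq_true] at hpre
  have hpre' : ∀ c ∈ value.toList, 32 ≤ c.toNat ∧ c.toNat < 255 ∧ c ≠ '"' := by
    intro c hc
    have := hpre c hc
    simp only [Bool.and_eq_true, decide_eq_true_eq, bne_iff_ne] at this
    exact ⟨this.1.1, this.1.2, this.2⟩
  unfold Spec_as_define_value_py as_define_value_py as_define_value_py_alt
  rw [aScan_true_of_good _ hpre', bEscape_of_good _ hpre', replace_backslash]
  rfl
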